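-- pv_equiv track=rewrite | github.com/GlennPegden2/TransFS | app/sourcepath.py | _parse_zippath_notation
-- ===== SOURCE A (Python) =====
-- from typing import Any, Optional
--
-- def _parse_zippath_notation(path_str: str) -> Optional[tuple[str, str]]:
--     """
--     Parse zippath-style notation like 'Software/MMB/BEEB2.zip/BEEB.MMB'
--     Returns (zip_path, internal_path) if a .zip component is found, else None.
--     """
--     parts = path_str.split('/')
--     for i, part in enumerate(parts):
--         if part.lower().endswith('.zip'):
--             zip_path = '/'.join(parts[:i+1])
--             internal_path = '/'.join(parts[i+1:]) if i+1 < len(parts) else ''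
--             return (zip_path, internal_path) if internal_path else None
--     return None
-- ===== SOURCE B (Python) =====
-- from typing import Any, Optional
--
-- def _parse_zippath_notation(path_str: str) -> Optional[tuple[str, str]]:
--     """
--     Single left-to-right scan of the raw string: find the first position where
--     '.zip' (case-insensitive) ends a path component (i.e. is followed by '/' or
--     the end of the string), then cut the string there -- no split/join.
--     """
--     n = len(path_str)
--     i = 0
--     while i + 4 <= n:
--         if path_str[i:i+4].lower() == '.zip' and (i + 4 == n or path_str[i+4] == '/'):
--             internal_path = path_str[i+5:]
--             return (path_str[:i+4], internal_path) if internal_path else None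
--         i += 1
--     return None
-- ===== Notes on version B (the rewrite author's own statement) =====
-- stated objective: alternative
-- what changed: Replaces split('/')-then-loop-over-components-with-joins by a single left-to-right scan of the raw string that finds the first '.zip' occurrence ending a component and cuts the string there with slices, never building the parts list.
import Mathlib
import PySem

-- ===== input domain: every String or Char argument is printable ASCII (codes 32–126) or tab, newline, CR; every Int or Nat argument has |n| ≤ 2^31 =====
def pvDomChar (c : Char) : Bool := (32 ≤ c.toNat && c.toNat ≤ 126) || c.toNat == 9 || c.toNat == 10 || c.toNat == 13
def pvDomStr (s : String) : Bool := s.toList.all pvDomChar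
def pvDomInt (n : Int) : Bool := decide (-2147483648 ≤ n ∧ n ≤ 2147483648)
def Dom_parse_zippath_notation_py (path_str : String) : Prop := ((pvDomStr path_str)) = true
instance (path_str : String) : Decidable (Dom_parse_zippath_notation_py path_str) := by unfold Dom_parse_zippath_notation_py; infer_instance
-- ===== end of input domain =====

-- B replaces A's split('/')-then-loop-with-joins by a single left-to-right scan of the raw
-- string that cuts at the first '.zip' component boundary (objective: alternative algorithm).


-- ===== PORT A =====
-- the 'for i, part in enumerate(parts)' loop: 'rem' is the suffix of 'parts' still to visit, i its start index
def pvALoopA (parts : List (List Char)) (i : Nat) : List (List Char) → Option (List Char × List Char)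
  | [] => none
  | part :: rest =>
    if PySem.Chars.endswith (PySem.Chars.lower part) ".zip".toList then
      let zip_path := PySem.Chars.join ['/'] (parts.take (i+1))
      let internal_path := if i + 1 < parts.length then PySem.Chars.join ['/'] (parts.drop (i+1)) else []
      if internal_path ≠ [] then some (zip_path, internal_path) else none
    else pvALoopA parts (i+1) rest

def parse_zippath_notation_py (path_str : String) : Option (String × String) :=
  (pvALoopA (PySem.Chars.splitOn path_str.toList ['/']) 0
      (PySem.Chars.splitOn path_str.toList ['/'])).map
    (fun p => (String.ofList p.1, String.ofList p.2))

-- ===== PORT B =====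
-- the 'while i + 4 <= n' scan of Source B, on the character list
def pvBScan (cs : List Char) (i : Nat) : Option (List Char × List Char) :=
  if h : i + 4 ≤ cs.length then
    if PySem.Chars.lower (PySem.List.slice cs (some (i : Int)) (some ((i : Int) + 4))) = ".zip".toList
        ∧ (i + 4 = cs.length ∨ PySem.List.pyGet? cs ((i : Int) + 4) = some '/') then
      let internal := PySem.List.slice cs (some ((i : Int) + 5)) none
      if internal ≠ [] then some (PySem.List.slice cs none (some ((i : Int) + 4)), internal) else none
    else pvBScan cs (i+1)
  else none
  termination_by cs.length - i
  decreasing_by omega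

def parse_zippath_notation_py_alt (path_str : String) : Option (String × String) :=
  (pvBScan path_str.toList 0).map (fun p => (String.ofList p.1, String.ofList p.2))

-- ===== PRECONDITION & SPEC =====
def Spec_parse_zippath_notation_py (path_str : String) (out : Option (String × String)) : Prop := out = parse_zippath_notation_py_alt path_str
instance (path_str : String) (out : Option (String × String)) : Decidable (Spec_parse_zippath_notation_py path_str out) := by unfold Spec_parse_zippath_notation_py; infer_instance

-- ===== CLAIM (what is proved, stated in full; the proofs are below) =====
def Claim_equal_parse_zippath_notation_py : Prop := ∀ (path_str : String), Dom_parse_zippath_notation_py path_str → Spec_parse_zippath_notation_py path_str (parse_zippath_notation_py path_str)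

-- ===== LEMMAS AND PROOFS =====

-- 'part.lower().endswith(".zip")'
def pvEnds (p : List Char) : Bool := PySem.Chars.endswith (PySem.Chars.lower p) ".zip".toList

-- component-wise recursive form of A's loop
def pvA' : List (List Char) → Option (List Char × List Char)
  | [] => none
  | p :: ps =>
    if pvEnds p then
      if ps = [] then none
      else if PySem.Chars.join ['/'] ps = [] then none
      else some (p, PySem.Chars.join ['/'] ps)
    else (pvA' ps).map (fun q => (p ++ '/' :: q.1, q.2))

-- suffix-consuming recursive form of B's scan
def pvB' : List Char → Option (List Char × List Char)
  | [] => none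
  | c :: cs =>
    if PySem.Chars.lower ((c :: cs).take 4) = ".zip".toList
        ∧ ((c :: cs).length = 4 ∨ (c :: cs)[4]? = some '/') then
      if (c :: cs).drop 5 = [] then none else some ((c :: cs).take 4, (c :: cs).drop 5)
    else (pvB' cs).map (fun q => (c :: q.1, q.2))

-- every list of chars is slash-free or splits at its first '/'
theorem pvFirstSlash (l : List Char) :
    '/' ∉ l ∨ ∃ pre rest, l = pre ++ '/' :: rest ∧ '/' ∉ pre := by
  induction l with
  | nil => exact Or.inl (by simp)
  | cons c t ih =>
    by_cases hc : c = '/'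
    · exact Or.inr ⟨[], t, by simp [hc]⟩
    · rcases ih with h | ⟨pre, rest, rfl, hp⟩
      · exact Or.inl (by simp [h]; exact fun hh => hc hh.symm)
      · exact Or.inr ⟨c :: pre, rest, rfl, by simp [hp]; exact fun hh => hc hh.symm⟩

theorem pvGo_noslash (l : List Char) : ∀ (fuel : Nat) (cur : List Char) (acc : List (List Char)),
    '/' ∉ l → PySem.Chars.splitOn.go ['/'] fuel l cur acc = acc.reverse ++ [cur.reverse ++ l] := by
  induction l with
  | nil =>
    intro fuel cur acc _
    cases fuel <;> (rw [PySem.Chars.splitOn.go]; simp; try omega)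
  | cons c t ih =>
    intro fuel cur acc h
    have hc : ¬('/' = c) := fun hh => h (by simp [hh.symm])
    have ht : '/' ∉ t := fun hh => h (List.mem_cons_of_mem _ hh)
    cases fuel with
    | zero => rw [PySem.Chars.splitOn.go]; simp
    | succ f =>
      rw [PySem.Chars.splitOn.go]
      simp only [List.isPrefixOf]
      rw [if_neg (by simp [hc])]
      rw [ih f (c :: cur) acc ht]
      simp

theorem pvGo_slash (pre : List Char) : ∀ (fuel : Nat) (rest cur : List Char) (acc : List (List Char)),
    '/' ∉ pre → pre.length < fuel →
    PySem.Chars.splitOn.go ['/'] fuel (pre ++ '/' :: rest) cur acc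
      = PySem.Chars.splitOn.go ['/'] (fuel - (pre.length + 1)) rest [] ((cur.reverse ++ pre) :: acc) := by
  induction pre with
  | nil =>
    intro fuel rest cur acc _ hfuel
    cases fuel with
    | zero => omega
    | succ f =>
      simp only [List.nil_append]
      rw [PySem.Chars.splitOn.go]
      simp [List.isPrefixOf]
  | cons c pre' ih =>
    intro fuel rest cur acc h hfuel
    have hc : ¬('/' = c) := fun hh => h (by simp [hh.symm])
    have hp' : '/' ∉ pre' := fun hh => h (List.mem_cons_of_mem _ hh)
    cases fuel with
    | zero => omega
    | succ f =>
      simp only [List.cons_append]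
      rw [PySem.Chars.splitOn.go]
      simp only [List.isPrefixOf]
      rw [if_neg (by simp [hc])]
      rw [ih f rest (c :: cur) acc hp' (by simp at hfuel; omega)]
      simp

theorem pvGo_acc (n : Nat) : ∀ (l : List Char) (fuel fuel' : Nat) (cur : List Char) (acc : List (List Char)),
    l.length ≤ n → l.length < fuel → l.length < fuel' →
    PySem.Chars.splitOn.go ['/'] fuel l cur acc
      = acc.reverse ++ PySem.Chars.splitOn.go ['/'] fuel' l cur [] := by
  induction n with
  | zero =>
    intro l fuel fuel' cur acc hn h1 h2
    have : l = [] := by cases l <;> simp_all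
    subst this
    rw [pvGo_noslash [] fuel cur acc (by simp), pvGo_noslash [] fuel' cur [] (by simp)]
    simp
  | succ n ih =>
    intro l fuel fuel' cur acc hn h1 h2
    rcases pvFirstSlash l with h | ⟨pre, rest, rfl, hp⟩
    · rw [pvGo_noslash l fuel cur acc h, pvGo_noslash l fuel' cur [] h]; simp
    · have hlen : (pre ++ '/' :: rest).length = pre.length + 1 + rest.length := by simp; omega
      rw [pvGo_slash pre fuel rest cur acc hp (by omega),
        pvGo_slash pre fuel' rest cur [] hp (by omega)]
      rw [ih rest (fuel - (pre.length + 1)) (rest.length + 1) [] ((cur.reverse ++ pre) :: acc)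
          (by omega) (by omega) (by omega),
        ih rest (fuel' - (pre.length + 1)) (rest.length + 1) [] ((cur.reverse ++ pre) :: [])
          (by omega) (by omega) (by omega)]
      simp

theorem pvSplit_noslash (l : List Char) (h : '/' ∉ l) :
    PySem.Chars.splitOn l ['/'] = [l] := by
  unfold PySem.Chars.splitOn
  rw [pvGo_noslash l _ [] [] h]; simp

theorem pvSplit_slash (pre rest : List Char) (h : '/' ∉ pre) :
    PySem.Chars.splitOn (pre ++ '/' :: rest) ['/'] = pre :: PySem.Chars.splitOn rest ['/'] := by
  unfold PySem.Chars.splitOn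
  rw [pvGo_slash pre _ rest [] [] h (by simp)]
  have hf : (pre ++ '/' :: rest).length + 1 - (pre.length + 1) = rest.length + 1 := by
    simp
  rw [hf]
  simp only [List.reverse_nil, List.nil_append]
  rw [pvGo_acc rest.length rest _ (rest.length + 1) [] [pre] le_rfl (by omega) (by omega)]
  simp

theorem pvSplit_ne_nil (l : List Char) : PySem.Chars.splitOn l ['/'] ≠ [] := by
  rcases pvFirstSlash l with h | ⟨pre, rest, rfl, hp⟩
  · simp [pvSplit_noslash l h]
  · simp [pvSplit_slash pre rest hp]

theorem pvJoin_singleton (x : List Char) : PySem.Chars.join ['/'] [x] = x := by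
  simp [PySem.Chars.join, List.intercalate]

theorem pvJoin_cons (p : List Char) (ps : List (List Char)) (h : ps ≠ []) :
    PySem.Chars.join ['/'] (p :: ps) = p ++ '/' :: PySem.Chars.join ['/'] ps := by
  cases ps with
  | nil => exact absurd rfl h
  | cons q qs => simp [PySem.Chars.join, List.intercalate]

theorem pvJoin_split (n : Nat) : ∀ (l : List Char), l.length ≤ n →
    PySem.Chars.join ['/'] (PySem.Chars.splitOn l ['/']) = l := by
  induction n with
  | zero =>
    intro l hl
    have : l = [] := by cases l <;> simp_all
    subst this
    rw [pvSplit_noslash [] (by simp), pvJoin_singleton]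
  | succ n ih =>
    intro l hl
    rcases pvFirstSlash l with h | ⟨pre, rest, rfl, hp⟩
    · rw [pvSplit_noslash l h, pvJoin_singleton]
    · rw [pvSplit_slash pre rest hp,
        pvJoin_cons _ _ (pvSplit_ne_nil rest),
        ih rest (by simp at hl; omega)]

theorem pvJoin_snoc2 (xs : List (List Char)) (a z : List Char) :
    PySem.Chars.join ['/'] (xs ++ [a, z]) = PySem.Chars.join ['/'] (xs ++ [a ++ '/' :: z]) := by
  induction xs with
  | nil =>
    rw [List.nil_append, List.nil_append, pvJoin_cons a [z] (by simp),
      pvJoin_singleton, pvJoin_singleton]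
  | cons x xs ih =>
    rw [List.cons_append, List.cons_append, pvJoin_cons x _ (by simp),
      pvJoin_cons x _ (by simp), ih]

theorem pvALoopA_eq : ∀ (rem parts : List (List Char)) (i : Nat), parts.drop i = rem →
    pvALoopA parts i rem
      = (pvA' rem).map (fun q => (PySem.Chars.join ['/'] (parts.take i ++ [q.1]), q.2)) := by
  intro rem
  induction rem with
  | nil => intro parts i _; simp [pvALoopA, pvA']
  | cons p rest ih =>
    intro parts i hdrop
    have hi : i < parts.length := by
      by_contra hge
      rw [List.drop_eq_nil_of_le (by omega)] at hdrop
      exact List.cons_ne_nil _ _ hdrop.symm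
    have hgi : parts[i]? = some p := by
      have h0 := List.getElem?_drop (xs := parts) (i := i) (j := 0)
      rw [hdrop] at h0
      simpa using h0.symm
    have htake : parts.take (i+1) = parts.take i ++ [p] := by
      rw [List.take_add_one, hgi]; rfl
    have hdrop1 : parts.drop (i+1) = rest := by
      have h1 : parts.drop (i+1) = (parts.drop i).drop 1 := by rw [List.drop_drop]
      rw [h1, hdrop]; rfl
    have hlen : parts.length = i + 1 + rest.length := by
      have h2 := List.length_drop (l := parts) (i := i)
      rw [hdrop] at h2
      simp at h2
      omega
    by_cases he : PySem.Chars.endswith (PySem.Chars.lower p) ['.', 'z', 'i', 'p'] = true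
    · cases rest with
      | nil =>
        have hnc : ¬ (i + 1 < parts.length) := by simp at hlen; omega
        simp [pvALoopA, pvA', pvEnds, he, hnc]
      | cons r rs =>
        have hc : i + 1 < parts.length := by simp at hlen; omega
        by_cases hj : PySem.Chars.join ['/'] (r :: rs) = [] <;>
          simp [pvALoopA, pvA', pvEnds, he, hc, hdrop1, htake, hj]
    · rw [pvALoopA, if_neg (by simpa using he)]
      rw [ih parts (i+1) hdrop1]
      rw [pvA', if_neg (by simpa [pvEnds] using he)]
      cases pvA' rest with
      | none => simp
      | some q =>
        simp only [Option.map_some]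
        rw [htake, show parts.take i ++ [p] ++ [q.1] = parts.take i ++ [p, q.1] by simp,
          pvJoin_snoc2]

theorem pvB'_short (l : List Char) (h : l.length < 4) : pvB' l = none := by
  induction l with
  | nil => simp [pvB']
  | cons c cs ih =>
    rw [pvB', if_neg]
    · rw [ih (by simp at h ⊢; omega)]
      rfl
    · rintro ⟨h1, -⟩
      have hlen := congrArg List.length h1
      simp [PySem.Chars.lower] at hlen
      simp at h
      omega

theorem pvBScan_eq (n : Nat) : ∀ (cs : List Char) (i : Nat), cs.length - i ≤ n →
    pvBScan cs i = (pvB' (cs.drop i)).map (fun q => (cs.take i ++ q.1, q.2)) := by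
  induction n with
  | zero =>
    intro cs i hn
    rw [pvBScan, dif_neg (by omega)]
    rw [List.drop_eq_nil_of_le (by omega)]
    simp [pvB']
  | succ n ih =>
    intro cs i hn
    by_cases hle : i + 4 ≤ cs.length
    · have hl : cs.drop i = cs[i]'(by omega) :: cs.drop (i+1) := List.drop_eq_getElem_cons (by omega)
      have hcast4 : ((i : Int) + 4) = ((i + 4 : Nat) : Int) := by push_cast; ring
      have hcast5 : ((i : Int) + 5) = ((i + 5 : Nat) : Int) := by push_cast; ring
      have hslice : PySem.List.slice cs (some (i : Int)) (some ((i : Int) + 4)) = (cs.drop i).take 4 := by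
        rw [hcast4, PySem.List.slice_natCast]
        congr 1
        omega
      have hget : PySem.List.pyGet? cs ((i : Int) + 4) = (cs.drop i)[4]? := by
        rw [hcast4, PySem.List.pyGet?_natCast, List.getElem?_drop]
      have hlen4 : ((cs.drop i).length = 4) ↔ (i + 4 = cs.length) := by
        rw [List.length_drop]; omega
      have hint : PySem.List.slice cs (some ((i : Int) + 5)) none = (cs.drop i).drop 5 := by
        rw [hcast5, PySem.List.slice_from_natCast, List.drop_drop]
      have hzip : PySem.List.slice cs none (some ((i : Int) + 4)) = cs.take i ++ (cs.drop i).take 4 := by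
        rw [hcast4, PySem.List.slice_to_natCast, List.take_add]
      have htake1 : cs.take (i+1) = cs.take i ++ [cs[i]'(by omega)] := by
        rw [List.take_add_one, List.getElem?_eq_getElem (by omega)]
        rfl
      rw [pvBScan, dif_pos hle]
      simp only [hslice, hget, hint, hzip]
      conv_rhs => rw [hl, pvB']
      simp only [← hl, ← hlen4]
      by_cases hm : PySem.Chars.lower ((cs.drop i).take 4) = ".zip".toList
          ∧ ((cs.drop i).length = 4 ∨ (cs.drop i)[4]? = some '/')
      · rw [if_pos hm, if_pos hm]
        by_cases hd : (cs.drop i).drop 5 = []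
        · rw [if_neg (by simpa using hd), if_pos hd]
          simp
        · rw [if_pos (by simpa using hd), if_neg hd]
          simp
      · rw [if_neg hm, if_neg hm]
        rw [ih cs (i+1) (by omega)]
        cases pvB' (cs.drop (i+1)) with
        | none => simp
        | some q =>
          simp only [Option.map_some, htake1, List.append_assoc]
          rfl
    · rw [pvBScan, dif_neg hle]
      have : (cs.drop i).length < 4 := by rw [List.length_drop]; omega
      rw [pvB'_short _ this]
      simp

theorem pvLower_ne (l : List Char) (h : '/' ∈ l) :
    ¬ PySem.Chars.lower l = ".zip".toList := by
  intro he
  have hm : PySem.Chars.lowerChar '/' ∈ PySem.Chars.lower l := List.mem_map_of_mem h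
  rw [he] at hm
  exact absurd hm (by decide)

theorem pvEnds_len4 (p : List Char) (h : p.length = 4) :
    pvEnds p = true ↔ PySem.Chars.lower p = ".zip".toList := by
  rw [pvEnds, PySem.Chars.endswith_iff]
  constructor
  · intro hs
    exact (hs.eq_of_length (by simp [PySem.Chars.lower, h])).symm
  · intro hq
    rw [hq]

theorem pvEnds_cons (c : Char) (p : List Char) (h : pvEnds p = true) :
    pvEnds (c :: p) = true := by
  rw [pvEnds, PySem.Chars.endswith_iff] at h ⊢
  have hl : PySem.Chars.lower (c :: p) = PySem.Chars.lowerChar c :: PySem.Chars.lower p := rfl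
  rw [hl]
  exact h.trans (List.suffix_cons _ _)

theorem pvB'_noslash (l : List Char) (h : '/' ∉ l) : pvB' l = none := by
  induction l with
  | nil => simp [pvB']
  | cons c cs ih =>
    rw [pvB']
    by_cases hm : PySem.Chars.lower ((c :: cs).take 4) = ".zip".toList
        ∧ ((c :: cs).length = 4 ∨ (c :: cs)[4]? = some '/')
    · rcases hm.2 with h4 | hg
      · rw [if_pos hm, if_pos (List.drop_eq_nil_of_le (by omega))]
      · exact absurd (List.mem_of_getElem? hg) h
    · rw [if_neg hm, ih (fun hx => h (List.mem_cons_of_mem _ hx))]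
      rfl

theorem pvB'_decomp (pre rest : List Char) (hns : '/' ∉ pre) :
    pvB' (pre ++ '/' :: rest)
      = if pvEnds pre then (if rest = [] then none else some (pre, rest))
        else (pvB' rest).map (fun q => (pre ++ '/' :: q.1, q.2)) := by
  induction pre with
  | nil =>
    have he0 : pvEnds [] = false := by decide
    rw [List.nil_append, pvB', if_neg, he0]
    · simp
    · rintro ⟨h1, -⟩
      exact pvLower_ne _ (by simp) h1
  | cons c pre' ih =>
    have hns' : '/' ∉ pre' := fun hx => hns (List.mem_cons_of_mem _ hx)
    have hcne : ¬ ('/' = c) := fun hh => hns (by simp [hh.symm])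
    simp only [List.cons_append]
    rw [pvB']
    by_cases hm : PySem.Chars.lower ((c :: (pre' ++ '/' :: rest)).take 4) = ".zip".toList
        ∧ ((c :: (pre' ++ '/' :: rest)).length = 4 ∨ (c :: (pre' ++ '/' :: rest))[4]? = some '/')
    · -- from the match, the component (c :: pre') has length 4 and lowers to ".zip"
      have hp4 : (c :: pre').length = 4 := by
        rcases lt_trichotomy (c :: pre').length 4 with hlt | heq | hgt
        · exfalso
          have hg : (c :: (pre' ++ '/' :: rest))[(c :: pre').length]? = some '/' := by
            rw [show c :: (pre' ++ '/' :: rest) = (c :: pre') ++ '/' :: rest from rfl,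
              List.getElem?_append_right (le_refl _)]
            simp
          have hmem : '/' ∈ (c :: (pre' ++ '/' :: rest)).take 4 :=
            List.mem_of_getElem? (by rw [List.getElem?_take, if_pos hlt]; exact hg)
          exact pvLower_ne _ hmem hm.1
        · exact heq
        · exfalso
          have hne4 : ¬ ((c :: (pre' ++ '/' :: rest)).length = 4) := by
            simp at hgt ⊢
            omega
          rcases hm.2 with h4 | hg
          · exact hne4 h4
          · have : (c :: (pre' ++ '/' :: rest))[4]? = (c :: pre')[4]? := by
              rw [show c :: (pre' ++ '/' :: rest) = (c :: pre') ++ '/' :: rest from rfl,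
                List.getElem?_append_left (by omega)]
            rw [this] at hg
            exact hns (List.mem_of_getElem? hg)
      have htake4 : (c :: (pre' ++ '/' :: rest)).take 4 = c :: pre' := by
        rw [show c :: (pre' ++ '/' :: rest) = (c :: pre') ++ '/' :: rest from rfl,
          List.take_left' hp4]
      have hdrop5 : (c :: (pre' ++ '/' :: rest)).drop 5 = rest := by
        rw [show c :: (pre' ++ '/' :: rest) = ((c :: pre') ++ ['/']) ++ rest by simp,
          List.drop_left' (by have h5 := hp4; simp at h5 ⊢; omega)]
      have hends : pvEnds (c :: pre') = true := by
        rw [pvEnds_len4 _ hp4]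
        rw [htake4] at hm
        exact hm.1
      rw [if_pos hm, htake4, hdrop5, hends]
      by_cases hr : rest = [] <;> simp [hr]
    · rw [if_neg hm, ih hns']
      by_cases he' : pvEnds pre' = true
      · rw [he', pvEnds_cons c pre' he']
        by_cases hr : rest = [] <;> simp [hr]
      · have hcc : ¬ pvEnds (c :: pre') = true := by
          intro htrue
          rw [pvEnds, PySem.Chars.endswith_iff] at htrue
          have h0 : PySem.Chars.lower (c :: pre')
              = PySem.Chars.lowerChar c :: PySem.Chars.lower pre' := rfl
          rw [h0] at htrue
          rcases List.suffix_cons_iff.mp htrue with heq | hsuf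
          · have hlow : PySem.Chars.lower (c :: pre') = ".zip".toList := by
              rw [h0, ← heq]
            have hp4 : (c :: pre').length = 4 := by
              have hlen := congrArg List.length hlow
              simp [PySem.Chars.lower] at hlen ⊢
              omega
            apply hm
            refine ⟨?_, Or.inr ?_⟩
            · rw [show c :: (pre' ++ '/' :: rest) = (c :: pre') ++ '/' :: rest from rfl,
                List.take_left' hp4]
              exact hlow
            · rw [show c :: (pre' ++ '/' :: rest) = (c :: pre') ++ '/' :: rest from rfl,
                List.getElem?_append_right (by omega)]
              simp [hp4]
          · exact he' (by rw [pvEnds, PySem.Chars.endswith_iff]; exact hsuf)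
        rw [Bool.not_eq_true] at he' hcc
        rw [he', hcc]
        simp only [Bool.false_eq_true, if_false]
        cases pvB' rest with
        | none => rfl
        | some q => rfl

theorem pvMain (n : Nat) : ∀ (l : List Char), l.length ≤ n →
    pvA' (PySem.Chars.splitOn l ['/']) = pvB' l := by
  induction n with
  | zero =>
    intro l hl
    have : l = [] := by cases l <;> simp_all
    subst this
    rw [pvSplit_noslash [] (by simp), pvB'_noslash [] (by simp)]
    simp [pvA', pvEnds]
  | succ n ih =>
    intro l hl
    rcases pvFirstSlash l with h | ⟨pre, rest, rfl, hp⟩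
    · rw [pvSplit_noslash l h, pvB'_noslash l h]
      by_cases he : pvEnds l = true <;> simp [pvA', he]
    · rw [pvSplit_slash pre rest hp, pvB'_decomp pre rest hp]
      by_cases he : pvEnds pre = true
      · rw [pvA', if_pos he, if_neg (pvSplit_ne_nil rest),
          pvJoin_split rest.length rest le_rfl, he]
        by_cases hr : rest = [] <;> simp [hr]
      · rw [Bool.not_eq_true] at he
        rw [pvA', he]
        simp only [Bool.false_eq_true, if_false]
        rw [ih rest (by simp at hl; omega)]

-- ===== VERDICT (by name: the statement is the Claim_ definition above) =====
theorem parse_zippath_notation_py_spec : Claim_equal_parse_zippath_notation_py := by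
  intro s _
  unfold Spec_parse_zippath_notation_py parse_zippath_notation_py parse_zippath_notation_py_alt
  have hA := pvALoopA_eq (PySem.Chars.splitOn s.toList ['/']) (PySem.Chars.splitOn s.toList ['/']) 0 (by simp)
  have hB := pvBScan_eq s.toList.length s.toList 0 (by omega)
  simp only [List.take_zero, List.nil_append, List.drop_zero] at hA hB
  rw [hA, hB, pvMain s.toList.length s.toList le_rfl]
  cases pvB' s.toList with
  | none => rfl
  | some q => simp
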